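-- pv_equiv track=rewrite | github.com/JavanXD/ha-package_deliveries | custom_components/package_deliveries/custom_scripts/check_package_deliveries.py | merge_duplicate_deliveries
-- ===== SOURCE A (Python) =====
-- def merge_duplicate_deliveries(deliveries):
--     """
--     Merges duplicate deliveries based on tracking_number.
--     Prioritizes detailed info from Amazon but keeps the latest delivery date from DHL if present.
--     Extends the list of delivered items from Amazon with the same tracking number.
--     Updates total_amount by concatenating prices with 'ü'.
--     Separates order_number with a semicolon if there are multiple for the same tracking number.
--     """
--     unique_deliveries = {}
--
--     for delivery in deliveries:
--         tracking_number = delivery.get("tracking_number")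
--
--         # If the tracking number already exists, merge the details
--         if tracking_number in unique_deliveries:
--             existing_delivery = unique_deliveries[tracking_number]
--
--             # Prefer Amazon details but update with latest DHL delivery date if newer
--             if delivery["service"] == "DHL":
--                 # Keep the DHL delivery date if it's more recent or Amazon's is "Unknown"
--                 existing_delivery["delivery_date"] = delivery["delivery_date"]
--             elif delivery["service"] == "Amazon":
--                 # Extend the items list with new items, if present
--                 existing_items = existing_delivery.get("items", "")
--                 new_items = delivery.get("items", "")
--                 if existing_items and new_items:
--                     existing_delivery["items"] = f"{existing_items}; {new_items}"
--                 elif new_items: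
--                     existing_delivery["items"] = new_items
--
--                 # Concatenate total amounts with a "ü" in between
--                 existing_total_amount = existing_delivery.get("total_amount", "")
--                 new_total_amount = delivery.get("total_amount", "")
--                 if existing_total_amount and new_total_amount:
--                     existing_delivery["total_amount"] = f"{existing_total_amount} + {new_total_amount}"
--                 elif new_total_amount:
--                     existing_delivery["total_amount"] = new_total_amount
--
--                 # Concatenate order numbers with a semicolon if different
--                 existing_order_number = existing_delivery.get("order_number", "")
--                 new_order_number = delivery.get("order_number", "")
--                 if existing_order_number and new_order_number and existing_order_number != new_order_number:
--                     existing_delivery["order_number"] = f"{existing_order_number}; {new_order_number}"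
--                 elif new_order_number:
--                     existing_delivery["order_number"] = new_order_number
--
--         else:
--             # If it's the first time seeing this tracking number, add it to unique deliveries
--             unique_deliveries[tracking_number] = delivery
--
--     # Convert the unique_deliveries dict back to a list
--     return list(unique_deliveries.values())
-- ===== SOURCE B (Python) =====
-- def _merged_value(old, new, sep, require_diff):
--     """Value the original assigns to a field given a nonempty new value."""
--     if old and (not require_diff or old != new):
--         return f"{old}{sep}{new}"
--     return new
--
--
-- def _absorb(acc, later):
--     """Fold one later duplicate into acc, applying the DHL/Amazon rules."""
--     if later["service"] == "DHL":
--         acc["delivery_date"] = later["delivery_date"]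
--     elif later["service"] == "Amazon":
--         for field, sep, require_diff in (("items", "; ", False),
--                                          ("total_amount", " + ", False),
--                                          ("order_number", "; ", True)):
--             new = later.get(field, "")
--             if new:
--                 acc[field] = _merged_value(acc.get(field, ""), new, sep, require_diff)
--
--
-- def merge_duplicate_deliveries(deliveries):
--     # No dict: repeatedly take the first remaining delivery, partition the rest of
--     # the stream into its duplicates (same tracking_number) and the others, fold the
--     # duplicates into it, and continue with the others.
--     merged = []
--     remaining = list(deliveries)
--     while remaining:
--         head = remaining[0]
--         tn = head.get("tracking_number")
--         dups, rest = [], []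
--         for d in remaining[1:]:
--             (dups if d.get("tracking_number") == tn else rest).append(d)
--         for later in dups:
--             _absorb(head, later)
--         merged.append(head)
--         remaining = rest
--     return merged
-- ===== Notes on version B (the rewrite author's own statement) =====
-- stated objective: alternative
-- what changed: A streams once over the list merging duplicates into a dict keyed by tracking_number; B uses no dict at all: it repeatedly takes the first remaining delivery, partitions the rest into its duplicates and the others, folds the duplicates into it with a field-table merge helper, and recurses on the others.
import Mathlib
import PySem

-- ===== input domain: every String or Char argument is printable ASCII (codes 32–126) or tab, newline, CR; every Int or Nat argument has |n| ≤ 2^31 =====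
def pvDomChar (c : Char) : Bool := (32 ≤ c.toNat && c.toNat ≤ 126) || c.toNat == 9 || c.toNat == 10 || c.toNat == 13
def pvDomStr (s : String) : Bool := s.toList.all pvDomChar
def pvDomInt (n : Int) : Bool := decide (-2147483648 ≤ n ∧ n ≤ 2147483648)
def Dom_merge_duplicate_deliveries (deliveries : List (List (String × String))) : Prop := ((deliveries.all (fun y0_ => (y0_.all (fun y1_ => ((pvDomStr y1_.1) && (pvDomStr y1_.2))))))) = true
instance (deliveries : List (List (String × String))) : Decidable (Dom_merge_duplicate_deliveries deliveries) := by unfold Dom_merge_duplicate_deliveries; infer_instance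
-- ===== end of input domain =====

-- B replaces A's single-pass dict-of-merged-deliveries by a dict-free partition loop:
-- take the first remaining delivery, split the rest into its duplicates and the others,
-- fold the duplicates in, continue with the others (objective: alternative; A is O(n),
-- B is O(n^2)). Both Pythons mutate the first-seen dict objects of the input in place;
-- the equivalence proved here is about the RETURN value only.

-- Each Python delivery dict is a List (String × String); these helpers give Python's dict
-- semantics (first-match lookup / .get default / in-place overwrite assignment) on that list.
def pvGet (d : List (String × String)) (k : String) : Option String :=
  (PySem.Dict.mk d).get? k
def pvGetD (d : List (String × String)) (k dflt : String) : String :=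
  (PySem.Dict.mk d).getD k dflt
def pvSet (d : List (String × String)) (k v : String) : List (String × String) :=
  ((PySem.Dict.mk d).insert k v).items

-- ===== PORT A =====
-- A's inline DHL/Amazon merge rules, verbatim from the body of its `if tracking_number
-- in unique_deliveries` branch. Where the Python raises KeyError (missing "service", or
-- "delivery_date" on a DHL duplicate) this returns `ex` unchanged; Pre_ excludes exactly
-- those inputs.
def pvMergeRules (ex d : List (String × String)) : List (String × String) :=
  match pvGet d "service" with
  | some "DHL" =>
      match pvGet d "delivery_date" with
      | some dd => pvSet ex "delivery_date" dd
      | none => ex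
  | some "Amazon" =>
      let ei := pvGetD ex "items" ""
      let ni := pvGetD d "items" ""
      let ex := if ei ≠ "" ∧ ni ≠ "" then pvSet ex "items" (ei ++ "; " ++ ni)
                else if ni ≠ "" then pvSet ex "items" ni else ex
      let et := pvGetD ex "total_amount" ""
      let nt := pvGetD d "total_amount" ""
      let ex := if et ≠ "" ∧ nt ≠ "" then pvSet ex "total_amount" (et ++ " + " ++ nt)
                else if nt ≠ "" then pvSet ex "total_amount" nt else ex
      let eo := pvGetD ex "order_number" ""
      let no := pvGetD d "order_number" ""
      if eo ≠ "" ∧ no ≠ "" ∧ eo ≠ no then pvSet ex "order_number" (eo ++ "; " ++ no)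
      else if no ≠ "" then pvSet ex "order_number" no else ex
  | some _ => ex
  | none => ex

-- single pass: dict tracking_number -> merged delivery, then its values
def merge_duplicate_deliveries (deliveries : List (List (String × String))) : List (List (String × String)) :=
  (deliveries.foldl
    (fun u delivery =>
      let tn := pvGet delivery "tracking_number"
      if u.contains tn then u.insert tn (pvMergeRules (u.getD tn []) delivery)
      else u.insert tn delivery)
    PySem.Dict.empty).values

-- ===== PORT B =====
-- Source B's `_merged_value`: the value assigned to a field given a nonempty new value
def pvMergedValue (old newv sep : String) (requireDiff : Bool) : String :=
  if old ≠ "" ∧ (requireDiff = false ∨ old ≠ newv) then old ++ sep ++ newv else newv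

-- Source B's `_absorb`: fold one later duplicate into acc (field table for the Amazon case)
def pvAbsorb (acc later : List (String × String)) : List (String × String) :=
  match pvGet later "service" with
  | some "DHL" =>
      match pvGet later "delivery_date" with
      | some dd => pvSet acc "delivery_date" dd
      | none => acc
  | some "Amazon" =>
      [("items", "; ", false), ("total_amount", " + ", false),
       ("order_number", "; ", true)].foldl
        (fun acc fld =>
          let nv := pvGetD later fld.1 ""
          if nv ≠ "" then pvSet acc fld.1 (pvMergedValue (pvGetD acc fld.1 "") nv fld.2.1 fld.2.2)
          else acc)
        acc
  | some _ => acc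
  | none => acc

-- Source B's while loop over `remaining` (head / partition of the tail / fold / continue)
def pvAltGo (remaining : List (List (String × String))) : List (List (String × String)) :=
  match remaining with
  | [] => []
  | head :: rest =>
      let tn := pvGet head "tracking_number"
      let dups := rest.filter (fun d => pvGet d "tracking_number" == tn)
      let others := rest.filter (fun d => ¬(pvGet d "tracking_number" == tn))
      (dups.foldl pvAbsorb head) :: pvAltGo others
termination_by remaining.length
decreasing_by
  simp only [List.length_cons, List.length_unattach]
  exact Nat.lt_succ_of_le ((List.length_filter_le _ _).trans (by simp))

def merge_duplicate_deliveries_alt (deliveries : List (List (String × String))) : List (List (String × String)) :=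
  pvAltGo deliveries

-- ===== PRECONDITION & SPEC =====
-- Pre_ excludes exactly the inputs where Python A raises KeyError: a delivery whose
-- tracking_number was already seen but which has no "service" key, or is a "DHL"
-- duplicate without a "delivery_date" key.
def Pre_merge_duplicate_deliveries (deliveries : List (List (String × String))) : Prop :=
  ∀ j : Fin deliveries.length,
    (∃ i : Fin deliveries.length, i < j ∧
        pvGet deliveries[i] "tracking_number" = pvGet deliveries[j] "tracking_number") →
      (pvGet deliveries[j] "service").isSome ∧
      (pvGet deliveries[j] "service" = some "DHL" → (pvGet deliveries[j] "delivery_date").isSome)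
instance (deliveries : List (List (String × String))) : Decidable (Pre_merge_duplicate_deliveries deliveries) := by unfold Pre_merge_duplicate_deliveries; infer_instance

def pvWitness_merge_duplicate_deliveries : (List (List (String × String))) :=
  [[("tracking_number", "T1"), ("service", "Amazon"), ("items", "book"), ("order_number", "o1")],
   [("tracking_number", "T1"), ("service", "Amazon"), ("items", "pen"), ("order_number", "o2")],
   [("tracking_number", "T2"), ("service", "DHL")]]

def Spec_merge_duplicate_deliveries (deliveries : List (List (String × String))) (out : List (List (String × String))) : Prop := out = merge_duplicate_deliveries_alt deliveries
instance (deliveries : List (List (String × String))) (out : List (List (String × String))) : Decidable (Spec_merge_duplicate_deliveries deliveries out) := by unfold Spec_merge_duplicate_deliveries; infer_instance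

-- ===== CLAIM (what is proved, stated in full; the proofs are below) =====
def Claim_equal_merge_duplicate_deliveries : Prop := ∀ (deliveries : List (List (String × String))), Dom_merge_duplicate_deliveries deliveries → Pre_merge_duplicate_deliveries deliveries → Spec_merge_duplicate_deliveries deliveries (merge_duplicate_deliveries deliveries)

-- ===== LEMMAS AND PROOFS =====

-- B's one-duplicate fold computes exactly A's inline merge rules
theorem pvAbsorb_eq_mergeRules (acc d : List (String × String)) :
    pvAbsorb acc d = pvMergeRules acc d := by
  unfold pvAbsorb pvMergeRules
  cases pvGet d "service" with
  | none => rfl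
  | some s =>
    by_cases hD : s = "DHL"
    · subst hD; rfl
    by_cases hA : s = "Amazon"
    · subst hA
      simp only [List.foldl_cons, List.foldl_nil, pvMergedValue]
      by_cases hni : pvGetD d "items" "" = "" <;>
        by_cases hnt : pvGetD d "total_amount" "" = "" <;>
          simp only [hni, hnt, if_true, ne_eq, not_true_eq_false, not_false_eq_true,
            and_false, if_neg] <;>
        · split_ifs <;> simp_all
    · split <;> simp_all

-- the group dict B implicitly computes: tracking_number -> deliveries in encounter order
def pvGroupFold (l : List (List (String × String)))
    (g : PySem.Dict (Option String) (List (List (String × String)))) :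
    PySem.Dict (Option String) (List (List (String × String))) :=
  l.foldl
    (fun g delivery =>
      let tn := pvGet delivery "tracking_number"
      g.insert tn (g.getD tn [] ++ [delivery])) g

-- fold of a group through the merge rules
def pvFoldGroup (group : List (List (String × String))) : List (String × String) :=
  match group with
  | [] => []
  | first :: rest => rest.foldl pvMergeRules first

-- A's dict is the group dict with every group folded
def pvMapFold (g : PySem.Dict (Option String) (List (List (String × String)))) :
    PySem.Dict (Option String) (List (String × String)) :=
  PySem.Dict.mk (g.items.map (fun p => (p.1, pvFoldGroup p.2)))

theorem pvMapFold_contains (g : PySem.Dict (Option String) (List (List (String × String))))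
    (k : Option String) : (pvMapFold g).contains k = g.contains k := by
  cases g with
  | mk l =>
    simp only [pvMapFold, PySem.Dict.contains, List.any_map]
    rfl

theorem pvMapFold_get? (g : PySem.Dict (Option String) (List (List (String × String))))
    (k : Option String) : (pvMapFold g).get? k = (g.get? k).map pvFoldGroup := by
  cases g with
  | mk l =>
    simp only [pvMapFold, PySem.Dict.get?, List.find?_map, Option.map_map]
    rfl

theorem pvMapFold_insert (g : PySem.Dict (Option String) (List (List (String × String))))
    (k : Option String) (v : List (List (String × String))) :
    pvMapFold (g.insert k v) = (pvMapFold g).insert k (pvFoldGroup v) := by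
  cases g with
  | mk l =>
    have hc : ((PySem.Dict.mk (l.map (fun p => (p.1, pvFoldGroup p.2)))).contains k)
        = (PySem.Dict.mk l).contains k := pvMapFold_contains (PySem.Dict.mk l) k
    simp only [pvMapFold, PySem.Dict.insert, PySem.Dict.contains] at hc ⊢
    by_cases h : (l.any fun p => p.1 == k) = true
    · rw [if_pos h, if_pos (hc.trans (by simpa using h))]
      simp only [List.map_map]
      apply PySem.Dict.ext
      refine List.map_congr_left (fun p _ => ?_)
      by_cases hp : p.1 = k <;> simp [hp]
    · rw [if_neg h, if_neg (by rw [hc]; simpa using h)]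
      simp

theorem pvInv (g : PySem.Dict (Option String) (List (List (String × String))))
    (hne : ∀ p ∈ g.items, p.2 ≠ []) (k : Option String)
    (v : List (List (String × String))) (hv : v ≠ []) :
    ∀ p ∈ (g.insert k v).items, p.2 ≠ [] := by
  intro p hp
  rw [PySem.Dict.mem_items_insert] at hp
  rcases hp with rfl | ⟨hp, -⟩
  · exact hv
  · exact hne p hp

theorem pvStep (g : PySem.Dict (Option String) (List (List (String × String))))
    (d : List (String × String)) (hne : ∀ p ∈ g.items, p.2 ≠ []) :
    (if (pvMapFold g).contains (pvGet d "tracking_number") = true then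
        (pvMapFold g).insert (pvGet d "tracking_number")
          (pvMergeRules ((pvMapFold g).getD (pvGet d "tracking_number") []) d)
      else (pvMapFold g).insert (pvGet d "tracking_number") d)
    = pvMapFold (g.insert (pvGet d "tracking_number")
        (g.getD (pvGet d "tracking_number") [] ++ [d])) := by
  set tn := pvGet d "tracking_number" with htn
  by_cases h : g.contains tn = true
  · obtain ⟨grp, hget⟩ : ∃ grp, g.get? tn = some grp := by
      have h2 := PySem.Dict.contains_eq_isSome_get? (d := g) (k := tn)
      rw [h] at h2
      exact Option.isSome_iff_exists.mp h2.symm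
    have hgrp : grp ≠ [] := hne _ (PySem.Dict.mem_items_of_get?_eq_some _ hget)
    rw [if_pos (by rw [pvMapFold_contains]; exact h)]
    have hgd : (pvMapFold g).getD tn [] = pvFoldGroup grp := by
      rw [PySem.Dict.getD_eq_get?_getD, pvMapFold_get?, hget]
      rfl
    have hgd2 : g.getD tn [] = grp := PySem.Dict.getD_of_get?_eq_some g [] hget
    have hfold : pvMergeRules (pvFoldGroup grp) d = pvFoldGroup (grp ++ [d]) := by
      cases grp with
      | nil => exact absurd rfl hgrp
      | cons f r => simp [pvFoldGroup, List.foldl_append]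
    rw [hgd, hfold, hgd2, pvMapFold_insert]
  · rw [if_neg (by rw [pvMapFold_contains]; exact h)]
    have hgd2 : g.getD tn [] = [] :=
      PySem.Dict.getD_of_not_contains g [] (by simpa using h)
    rw [hgd2, pvMapFold_insert]
    rfl

-- A's fold is the folded image of the group fold
theorem pvMain (l : List (List (String × String)))
    (g : PySem.Dict (Option String) (List (List (String × String))))
    (hne : ∀ p ∈ g.items, p.2 ≠ []) :
    l.foldl
      (fun u delivery =>
        let tn := pvGet delivery "tracking_number"
        if u.contains tn then u.insert tn (pvMergeRules (u.getD tn []) delivery)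
        else u.insert tn delivery) (pvMapFold g)
    = pvMapFold (pvGroupFold l g) := by
  induction l generalizing g with
  | nil => rfl
  | cons d l ih =>
    simp only [pvGroupFold, List.foldl_cons]
    rw [pvStep g d hne]
    exact ih _ (pvInv g hne _ _ (List.append_ne_nil_of_right_ne_nil _ (by simp)))

-- unfolding one step of the group fold
theorem pvGroupFold_cons (d : List (String × String)) (l : List (List (String × String)))
    (g : PySem.Dict (Option String) (List (List (String × String)))) :
    pvGroupFold (d :: l) g
    = pvGroupFold l (g.insert (pvGet d "tracking_number")
        (g.getD (pvGet d "tracking_number") [] ++ [d])) := rfl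

-- folding the tail over a dict whose first entry holds key tn: matching elements extend
-- that first group in place, the others fold over the tail dict
theorem pvGroupFold_cons_prefix (l : List (List (String × String))) (tn : Option String)
    (g : List (List (String × String)))
    (t : PySem.Dict (Option String) (List (List (String × String))))
    (ht : t.contains tn = false) :
    pvGroupFold l (PySem.Dict.mk ((tn, g) :: t.items))
    = PySem.Dict.mk ((tn, g ++ l.filter (fun d => pvGet d "tracking_number" == tn)) ::
        (pvGroupFold (l.filter (fun d => ¬(pvGet d "tracking_number" == tn))) t).items) := by
  induction l generalizing g t with
  | nil => simp [pvGroupFold]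
  | cons d l ih =>
    rw [pvGroupFold_cons, List.filter_cons, List.filter_cons]
    by_cases hk : pvGet d "tracking_number" = tn
    · have hbeq : (pvGet d "tracking_number" == tn) = true := by simp [hk]
      have hgd : (PySem.Dict.mk ((tn, g) :: t.items)).getD (pvGet d "tracking_number") [] = g := by
        rw [PySem.Dict.getD_eq_get?_getD, hk, PySem.Dict.get?_mk_cons]
        simp
      have hins : (PySem.Dict.mk ((tn, g) :: t.items)).insert (pvGet d "tracking_number") (g ++ [d])
          = PySem.Dict.mk ((tn, g ++ [d]) :: t.items) := by
        rw [hk]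
        apply PySem.Dict.ext
        rw [PySem.Dict.items_insert_of_contains _ _ (by simp [PySem.Dict.contains])]
        simp only [List.map_cons, beq_self_eq_true, if_pos]
        congr 1
        refine (List.map_congr_left (fun p hp => ?_)).trans (List.map_id _)
        have : (p.1 == tn) = false := by
          simp only [PySem.Dict.contains, List.any_eq_false] at ht
          simpa using ht p hp
        simp [this]
      rw [hgd, hins, ih _ _ ht]
      simp [hbeq]
    · have hbeq : (pvGet d "tracking_number" == tn) = false := by simp [hk]
      have hne : (tn == pvGet d "tracking_number") = false := by
        simpa [BEq.comm] using hbeq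
      have hgd : (PySem.Dict.mk ((tn, g) :: t.items)).getD (pvGet d "tracking_number") []
          = t.getD (pvGet d "tracking_number") [] := by
        rw [PySem.Dict.getD_eq_get?_getD, PySem.Dict.get?_mk_cons, if_neg (by simp [hne]),
          PySem.Dict.getD_eq_get?_getD]
      have hcc : (PySem.Dict.mk ((tn, g) :: t.items)).contains (pvGet d "tracking_number")
          = t.contains (pvGet d "tracking_number") := by
        simp [PySem.Dict.contains, hne]
      have hins : (PySem.Dict.mk ((tn, g) :: t.items)).insert (pvGet d "tracking_number")
            (t.getD (pvGet d "tracking_number") [] ++ [d])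
          = PySem.Dict.mk ((tn, g) ::
              (t.insert (pvGet d "tracking_number") (t.getD (pvGet d "tracking_number") [] ++ [d])).items) := by
        apply PySem.Dict.ext
        by_cases hc : t.contains (pvGet d "tracking_number") = true
        · rw [PySem.Dict.items_insert_of_contains _ _ (by rw [hcc]; exact hc),
            PySem.Dict.items_insert_of_contains _ _ hc]
          simp only [List.map_cons]
          congr 1
          rw [if_neg (by simp [hne])]
        · rw [PySem.Dict.items_insert_of_not_contains _ _ (by rw [hcc]; simpa using hc),
            PySem.Dict.items_insert_of_not_contains _ _ (by simpa using hc)]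
          simp
      have ht' : (t.insert (pvGet d "tracking_number")
            (t.getD (pvGet d "tracking_number") [] ++ [d])).contains tn = false := by
        rw [PySem.Dict.contains_insert]
        simp [hne, ht]
      rw [hgd, hins, ih _ _ ht']
      rw [if_neg (by simp [hbeq]), if_pos (by simp [hbeq]), pvGroupFold_cons]

-- folding a whole group with B's absorb is folding it with A's merge rules
theorem pvFoldAbsorb (l : List (List (String × String))) (h : List (String × String)) :
    l.foldl pvAbsorb h = l.foldl pvMergeRules h := by
  induction l generalizing h with
  | nil => rfl
  | cons a l ihd => simp only [List.foldl_cons, pvAbsorb_eq_mergeRules]; exact ihd _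

-- B's partition loop computes the folded groups in first-seen order
theorem pvAltGo_eq (l : List (List (String × String))) :
    pvAltGo l = (pvMapFold (pvGroupFold l PySem.Dict.empty)).values := by
  generalize hn : l.length = n
  induction n using Nat.strong_induction_on generalizing l with
  | _ n ihn =>
  cases l with
  | nil =>
    simp [pvAltGo, pvGroupFold, pvMapFold, PySem.Dict.empty, PySem.Dict.values]
  | cons head rest =>
    subst hn
    set tn := pvGet head "tracking_number" with htn
    set dups := rest.filter (fun d => pvGet d "tracking_number" == tn) with hdups
    set others := rest.filter (fun d => ¬(pvGet d "tracking_number" == tn)) with hothers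
    have ih : pvAltGo others = (pvMapFold (pvGroupFold others PySem.Dict.empty)).values :=
      ihn others.length (Nat.lt_succ_of_le (List.length_filter_le _ _)) others rfl
    rw [pvAltGo]
    have hstep : pvGroupFold (head :: rest) PySem.Dict.empty
        = PySem.Dict.mk ((tn, head :: dups) :: (pvGroupFold others PySem.Dict.empty).items) := by
      have h0 : pvGroupFold (head :: rest) PySem.Dict.empty
          = pvGroupFold rest (PySem.Dict.mk [(tn, [head])]) := by
        rw [pvGroupFold_cons]; rfl
      rw [h0]
      have := pvGroupFold_cons_prefix rest tn [head] PySem.Dict.empty (by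
        simp [PySem.Dict.contains, PySem.Dict.empty])
      simpa [dups, others] using this
    rw [hstep, ih, pvFoldAbsorb]
    simp only [pvMapFold, List.map_cons, PySem.Dict.values_mk, pvFoldGroup]
    rfl

-- ===== VERDICT (by name: the statement is the Claim_ definition above) =====
theorem merge_duplicate_deliveries_spec : Claim_equal_merge_duplicate_deliveries := by
  intro deliveries _ _
  unfold Spec_merge_duplicate_deliveries merge_duplicate_deliveries merge_duplicate_deliveries_alt
  have h0 : (PySem.Dict.empty : PySem.Dict (Option String) (List (String × String)))
      = pvMapFold PySem.Dict.empty := rfl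
  rw [h0, pvMain deliveries PySem.Dict.empty (by intro p hp; simp [PySem.Dict.empty] at hp),
    pvAltGo_eq]
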